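-- pv_equiv track=rewrite | github.com/dsabdrashitov/adventofcode2023 | day11/day11_2.py | calc_doubled
-- ===== SOURCE A (Python) =====
-- GALAXY = '#'
--
-- def calc_doubled(field):
--     n = len(field)
--     m = len(field[0])
--     cntn = [0] * n
--     cntm = [0] * m
--     for i in range(n):
--         for j in range(m):
--             if field[i][j] == GALAXY:
--                 cntn[i] = cntn[i] + 1
--                 cntm[j] = cntm[j] + 1
--     doubled = [[0] * (n + 1), [0] * (m + 1)]
--     for i in range(n):
--         doubled[0][i + 1] = doubled[0][i] + (0 if cntn[i] > 0 else 1)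
--     for j in range(m):
--         doubled[1][j + 1] = doubled[1][j] + (0 if cntm[j] > 0 else 1)
--     return doubled
-- ===== SOURCE B (Python) =====
-- GALAXY = '#'
--
-- def calc_doubled(field):
--     n = len(field)
--     m = len(field[0])
--     rows = set(i for i in range(n) for j in range(m) if field[i][j] == GALAXY)
--     cols = set(j for i in range(n) for j in range(m) if field[i][j] == GALAXY)
--     def pref(size, occupied):
--         return [k - sum(1 for x in occupied if x < k) for k in range(size + 1)]
--     return [pref(n, rows), pref(m, cols)]
-- ===== Notes on version B (the rewrite author's own statement) =====
-- stated objective: alternative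
-- what changed: Instead of per-row/per-column galaxy counts and mutation-built prefix-sum arrays, B collects the sets of occupied row and column indices and computes each output entry directly by the closed formula k - |{x in occupied : x < k}|.
import Mathlib
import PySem

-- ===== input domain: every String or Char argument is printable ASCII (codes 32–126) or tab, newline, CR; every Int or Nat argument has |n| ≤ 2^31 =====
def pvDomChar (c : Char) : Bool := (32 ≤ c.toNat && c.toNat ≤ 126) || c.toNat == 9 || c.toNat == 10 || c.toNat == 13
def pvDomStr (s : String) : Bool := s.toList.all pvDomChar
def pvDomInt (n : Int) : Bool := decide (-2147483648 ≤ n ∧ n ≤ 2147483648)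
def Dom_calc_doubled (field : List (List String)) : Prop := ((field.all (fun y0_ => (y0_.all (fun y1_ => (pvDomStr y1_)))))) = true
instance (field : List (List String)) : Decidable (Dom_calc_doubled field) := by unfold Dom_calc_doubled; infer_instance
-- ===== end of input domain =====

-- B replaces A's per-row/per-column galaxy counts and mutation-built prefix-sum arrays with
-- sets of occupied row/column indices and the closed formula k - |{x in occ : x < k}| per entry
-- (objective: alternative).

def pvGALAXY : String := "#"

-- ===== PORT A =====
def calc_doubled (field : List (List String)) : List (List Int) :=
  let n : Int := PySem.List.len field
  let m : Int := PySem.List.len (PySem.List.pyGetD field 0 [])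
  let cnt :=
    (PySem.List.pyRange 0 n 1).foldl (fun (st : List Int × List Int) i =>
      (PySem.List.pyRange 0 m 1).foldl (fun (st : List Int × List Int) j =>
        if PySem.List.pyGetD (PySem.List.pyGetD field i []) j "" == pvGALAXY then
          (PySem.List.pySetD st.1 i (PySem.List.pyGetD st.1 i 0 + 1),
           PySem.List.pySetD st.2 j (PySem.List.pyGetD st.2 j 0 + 1))
        else st) st)
      (PySem.List.pyRepeat [(0 : Int)] n, PySem.List.pyRepeat [(0 : Int)] m)
  let d0 :=
    (PySem.List.pyRange 0 n 1).foldl (fun (d : List Int) i =>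
      PySem.List.pySetD d (i + 1)
        (PySem.List.pyGetD d i 0 + (if PySem.List.pyGetD cnt.1 i 0 > 0 then 0 else 1)))
      (PySem.List.pyRepeat [(0 : Int)] (n + 1))
  let d1 :=
    (PySem.List.pyRange 0 m 1).foldl (fun (d : List Int) j =>
      PySem.List.pySetD d (j + 1)
        (PySem.List.pyGetD d j 0 + (if PySem.List.pyGetD cnt.2 j 0 > 0 then 0 else 1)))
      (PySem.List.pyRepeat [(0 : Int)] (m + 1))
  [d0, d1]

-- ===== PORT B =====
-- pref(size, occupied): [k - sum(1 for x in occupied if x < k) for k in range(size+1)]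
-- (the sum counts set elements, order-independent: ported as countP over the Set's list)
def pvPref (size : Int) (occ : PySem.Set Int) : List Int :=
  (PySem.List.pyRange 0 (size + 1) 1).map
    (fun k => k - ((occ.countP (fun x => decide (x < k)) : Nat) : Int))

def calc_doubled_alt (field : List (List String)) : List (List Int) :=
  let n : Int := PySem.List.len field
  let m : Int := PySem.List.len (PySem.List.pyGetD field 0 [])
  let rows : PySem.Set Int := PySem.Set.ofList
    ((PySem.List.pyRange 0 n 1).flatMap (fun i =>
      ((PySem.List.pyRange 0 m 1).filter (fun j =>
        PySem.List.pyGetD (PySem.List.pyGetD field i []) j "" == pvGALAXY)).map (fun _ => i)))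
  let cols : PySem.Set Int := PySem.Set.ofList
    ((PySem.List.pyRange 0 n 1).flatMap (fun i =>
      (PySem.List.pyRange 0 m 1).filter (fun j =>
        PySem.List.pyGetD (PySem.List.pyGetD field i []) j "" == pvGALAXY)))
  [pvPref n rows, pvPref m cols]

-- ===== PRECONDITION & SPEC =====
-- Pre_ excludes exactly the inputs where A raises: an empty field (len(field[0]) IndexError)
-- and fields with a row shorter than row 0 (field[i][j] IndexError).
def Pre_calc_doubled (field : List (List String)) : Prop :=
  field ≠ [] ∧ ∀ row ∈ field, (field.headD []).length ≤ row.length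
instance (field : List (List String)) : Decidable (Pre_calc_doubled field) := by
  unfold Pre_calc_doubled; infer_instance

def pvWitness_calc_doubled : List (List String) := [[".", "#"], ["#", "."]]

def Spec_calc_doubled (field : List (List String)) (out : List (List Int)) : Prop := out = calc_doubled_alt field
instance (field : List (List String)) (out : List (List Int)) : Decidable (Spec_calc_doubled field out) := by unfold Spec_calc_doubled; infer_instance

-- ===== CLAIM (what is proved, stated in full; the proofs are below) =====
def Claim_equal_calc_doubled : Prop := ∀ (field : List (List String)), Dom_calc_doubled field → Pre_calc_doubled field → Spec_calc_doubled field (calc_doubled field)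

-- ===== LEMMAS AND PROOFS =====
theorem pv_bump_fold (t : Nat) (p : Nat → Bool) (js : List Nat) (y : List Int) (ht : t < y.length) :
    js.foldl (fun c j => if p j then c.set t (c.getD t 0 + 1) else c) y
      = y.set t (y.getD t 0 + (js.countP p : Int)) := by
  induction js generalizing y with
  | nil =>
    simp only [List.foldl_nil, List.countP_nil, Nat.cast_zero, add_zero,
      List.getD_eq_getElem _ _ ht, List.set_getElem_self ht]
  | cons j js ih =>
    simp only [List.foldl_cons, List.countP_cons]
    by_cases hp : p j
    · rw [if_pos hp, ih _ (by simpa using ht)]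
      simp only [List.set_set, hp, if_pos, List.getD_eq_getElem?_getD,
        List.getElem?_set_self ht, Option.getD_some]
      congr 1
      push_cast
      ring
    · rw [if_neg hp, ih _ ht]; simp [hp]

theorem pv_scatter_fold_len (p : Nat → Bool) (js : List Nat) (z : List Int) :
    (js.foldl (fun c j => if p j then c.set j (c.getD j 0 + 1) else c) z).length = z.length := by
  induction js generalizing z with
  | nil => rfl
  | cons j js ih =>
    simp only [List.foldl_cons]
    split
    · rw [ih]; simp
    · rw [ih]

theorem pv_scatter_fold_getD (p : Nat → Bool) (js : List Nat) (z : List Int) (k : Nat)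
    (hjs : ∀ j ∈ js, j < z.length) :
    (js.foldl (fun c j => if p j then c.set j (c.getD j 0 + 1) else c) z).getD k 0
      = z.getD k 0 + (js.countP (fun j => p j && j == k) : Int) := by
  induction js generalizing z with
  | nil => simp
  | cons j js ih =>
    have hj : j < z.length := hjs j (by simp)
    have hlen : ∀ x ∈ js, x < (z.set j (z.getD j 0 + 1)).length := by
      intro x hx; simpa using hjs x (by simp [hx])
    simp only [List.foldl_cons, List.countP_cons]
    by_cases hp : p j
    · rw [if_pos hp, ih _ hlen]
      by_cases hk : j = k
      · subst hk
        simp only [List.getD_eq_getElem?_getD, List.getElem?_set_self hj,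
          Option.getD_some, hp, BEq.rfl, Bool.and_self, if_pos]
        push_cast; ring
      · simp only [List.getD_eq_getElem?_getD, List.getElem?_set_ne hk, hp,
          Bool.true_and, beq_iff_eq, hk, if_false, Nat.cast_add, cond_false]
        simp [hk]
    · rw [if_neg hp, ih _ (fun x hx => hjs x (by simp [hx]))]; simp [hp]

-- countP of "j == k" over range m
theorem pv_countP_range_eq (p : Nat → Bool) (m k : Nat) :
    (List.range m).countP (fun j => p j && j == k) = if k < m ∧ p k then 1 else 0 := by
  induction m with
  | zero => simp
  | succ m ih =>
    rw [List.range_succ, List.countP_append, ih]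
    by_cases hk : k = m
    · subst hk; by_cases hp : p k <;> simp [hp, List.countP_cons]
    · have : ((m == k) : Bool) = false := by simp [Ne.symm hk]
      simp only [List.countP_cons, List.countP_nil, this, Bool.and_false, cond_false]
      by_cases h1 : k < m <;> by_cases hp : p k <;>
        simp [h1, hp, Nat.lt_succ_iff_lt_or_eq, hk] <;> omega

-- L3: the column-count double fold, elementwise
theorem pv_colfold (cellp : Nat → Nat → Bool) (m : Nat) (t : Nat) :
    ((List.range t).foldl
        (fun z i => (List.range m).foldl
          (fun c j => if cellp i j then c.set j (c.getD j 0 + 1) else c) z)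
        (List.replicate m (0:Int))).length = m ∧
    ∀ k, ((List.range t).foldl
        (fun z i => (List.range m).foldl
          (fun c j => if cellp i j then c.set j (c.getD j 0 + 1) else c) z)
        (List.replicate m (0:Int))).getD k 0
      = if k < m then ((List.range t).countP (fun i => cellp i k) : Int) else 0 := by
  induction t with
  | zero =>
    refine ⟨by simp, fun k => ?_⟩
    by_cases hk : k < m <;> simp [List.getD_eq_getElem?_getD, List.getElem?_replicate, hk]
  | succ t ih =>
    obtain ⟨ihl, ihg⟩ := ih
    simp only [List.range_succ, List.foldl_append, List.foldl_cons, List.foldl_nil]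
    constructor
    · rw [pv_scatter_fold_len (cellp t), ihl]
    · intro k
      rw [pv_scatter_fold_getD (cellp t) _ _ _ (by intro j hj; rw [ihl]; simpa using hj), ihg,
        pv_countP_range_eq, List.countP_append]
      by_cases hk : k < m <;> by_cases hc : cellp t k <;>
        simp [hk, hc, List.countP_cons]

-- L4: the row-count double fold (inner loop bumps the fixed row slot)
theorem pv_rowfold (g : Nat → Int) (n : Nat) (t : Nat) (ht : t ≤ n) :
    ((List.range t).foldl (fun y i => y.set i (y.getD i 0 + g i)) (List.replicate n (0:Int))).length = n ∧
    ∀ k, ((List.range t).foldl (fun y i => y.set i (y.getD i 0 + g i)) (List.replicate n (0:Int))).getD k 0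
      = if k < t then g k else 0 := by
  induction t with
  | zero =>
    refine ⟨by simp, fun k => ?_⟩
    by_cases hk : k < n <;> simp [List.getD_eq_getElem?_getD, List.getElem?_replicate, hk]
  | succ t ih =>
    obtain ⟨ihl, ihg⟩ := ih (by omega)
    simp only [List.range_succ, List.foldl_append, List.foldl_cons, List.foldl_nil]
    refine ⟨by rw [List.length_set]; exact ihl, fun k => ?_⟩
    by_cases hk : k = t
    · subst hk
      rw [List.getD_eq_getElem?_getD, List.getElem?_set_self (by rw [ihl]; omega),
        Option.getD_some, ihg]
      simp
    · rw [List.getD_eq_getElem?_getD, List.getElem?_set_ne (Ne.symm hk),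
        ← List.getD_eq_getElem?_getD, ihg]
      by_cases h1 : k < t <;> by_cases h2 : k < t + 1 <;> simp [h1, h2] <;> omega

-- the fused pair-state fold is two independent folds
theorem pv_pair_split (cellp : Nat → Nat → Bool) (n m : Nat) (a b : List Int) :
    (List.range n).foldl (fun st i => (List.range m).foldl
        (fun (st : List Int × List Int) j => if cellp i j then
            (st.1.set i (st.1.getD i 0 + 1), st.2.set j (st.2.getD j 0 + 1))
          else st) st)
      (a, b)
    = ((List.range n).foldl (fun y i => (List.range m).foldl
          (fun c j => if cellp i j then c.set i (c.getD i 0 + 1) else c) y) a,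
       (List.range n).foldl (fun z i => (List.range m).foldl
          (fun c j => if cellp i j then c.set j (c.getD j 0 + 1) else c) z) b) := by
  have houter : ∀ (st : List Int × List Int) (i : Nat),
      (List.range m).foldl
        (fun (st : List Int × List Int) j => if cellp i j then
            (st.1.set i (st.1.getD i 0 + 1), st.2.set j (st.2.getD j 0 + 1))
          else st) st
      = ((List.range m).foldl (fun c j => if cellp i j then c.set i (c.getD i 0 + 1) else c) st.1,
         (List.range m).foldl (fun c j => if cellp i j then c.set j (c.getD j 0 + 1) else c) st.2) := by
    intro st i
    have hstep : (fun (st : List Int × List Int) (j : Nat) => if cellp i j then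
            (st.1.set i (st.1.getD i 0 + 1), st.2.set j (st.2.getD j 0 + 1))
          else st)
        = (fun (st : List Int × List Int) (j : Nat) =>
            (if cellp i j then st.1.set i (st.1.getD i 0 + 1) else st.1,
             if cellp i j then st.2.set j (st.2.getD j 0 + 1) else st.2)) := by
      funext st j; split <;> rfl
    rw [hstep]
    exact PySem.List.foldl_prod_mk
      (fun c j => if cellp i j then c.set i (c.getD i 0 + 1) else c)
      (fun c j => if cellp i j then c.set j (c.getD j 0 + 1) else c)
      (List.range m) st.1 st.2
  exact (PySem.List.foldl_congr_mem (List.range n) _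
      (fun (st : List Int × List Int) i =>
        ((List.range m).foldl (fun c j => if cellp i j then c.set i (c.getD i 0 + 1) else c) st.1,
         (List.range m).foldl (fun c j => if cellp i j then c.set j (c.getD j 0 + 1) else c) st.2))
      (a, b) (fun acc x _ => houter acc x)).trans
    (PySem.List.foldl_prod_mk
      (fun y i => (List.range m).foldl (fun c j => if cellp i j then c.set i (c.getD i 0 + 1) else c) y)
      (fun z i => (List.range m).foldl (fun c j => if cellp i j then c.set j (c.getD j 0 + 1) else c) z)
      (List.range n) a b)

-- the row inner fold is a single bump of slot i
theorem pv_rowfold_eq (cellp : Nat → Nat → Bool) (n m t : Nat) (ht : t ≤ n) :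
    (List.range t).foldl (fun y i => (List.range m).foldl
        (fun c j => if cellp i j then c.set i (c.getD i 0 + 1) else c) y)
      (List.replicate n (0:Int))
    = (List.range t).foldl
        (fun y i => y.set i (y.getD i 0 + (((List.range m).countP (cellp i) : Nat) : Int)))
        (List.replicate n (0:Int)) := by
  induction t with
  | zero => rfl
  | succ t ih =>
    rw [List.range_succ, List.foldl_append, List.foldl_append, List.foldl_cons, List.foldl_cons,
      List.foldl_nil, List.foldl_nil, ih (by omega)]
    rw [pv_bump_fold t (cellp t) _ _ (by rw [(pv_rowfold _ n t (by omega)).1]; omega)]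

-- L5: A's prefix loop writes d[i+1] = d[i] + w i into a preallocated list
theorem pv_prefA (w : Nat → Int) (n t : Nat) (ht : t ≤ n) :
    (List.range t).foldl (fun d i => d.set (i+1) (d.getD i 0 + w i)) (List.replicate (n+1) (0:Int))
      = (List.range (t+1)).map (fun k => ((List.range k).map w).sum) ++ List.replicate (n - t) (0:Int) := by
  induction t with
  | zero => simp [List.replicate_succ]
  | succ t ih =>
    rw [List.range_succ, List.foldl_append, List.foldl_cons, List.foldl_nil, ih (by omega)]
    have hlen : ((List.range (t+1)).map (fun k => ((List.range k).map w).sum)).length = t + 1 := by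
      simp
    have hrep : List.replicate (n - t) (0:Int) = 0 :: List.replicate (n - (t+1)) (0:Int) := by
      rw [← List.replicate_succ]; congr 1; omega
    have hgetD : (((List.range (t+1)).map (fun k => ((List.range k).map w).sum)
        ++ List.replicate (n - t) (0:Int))).getD t 0 = ((List.range t).map w).sum := by
      rw [List.getD_eq_getElem?_getD, List.getElem?_append_left (by simp)]
      simp
    rw [hgetD, hrep, List.set_append_right _ _ (by rw [hlen]), hlen]
    rw [List.range_succ (n := t+1), List.map_append]
    simp only [Nat.add_sub_cancel_left, Nat.sub_self, List.set_cons_zero, List.map_cons,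
      List.map_nil, List.append_assoc, List.cons_append, List.nil_append]
    simp [List.map_append, List.sum_append]
    rw [List.range_succ, List.map_append, List.sum_append]
    simp

-- L8r: a 0/1 ite-sum over range k is a countP over range k
theorem pv_sum_ite (w : Nat → Int) (q : Nat → Bool) (k : Nat)
    (h : ∀ i < k, w i = if q i then 1 else 0) :
    ((List.range k).map w).sum = ((List.range k).countP q : Int) := by
  induction k with
  | zero => simp
  | succ k ih =>
    rw [List.range_succ, List.map_append, List.sum_append, List.countP_append,
      ih (fun i hi => h i (by omega))]
    simp only [List.map_cons, List.map_nil, List.sum_cons, List.sum_nil, add_zero,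
      h k (by omega)]
    by_cases hq : q k <;> simp [hq]

-- L10: countP over a take is a countP over indices
theorem pv_countP_take {α : Type} (l : List α) (p : α → Bool) (d : α) (k : Nat) (hk : k ≤ l.length) :
    (l.take k).countP p = (List.range k).countP (fun i => p (l.getD i d)) := by
  induction k with
  | zero => simp
  | succ k ih =>
    rw [List.take_succ, List.range_succ, List.countP_append, List.countP_append,
      List.getElem?_eq_getElem (by omega), ih (by omega)]
    have hg : l.getD k d = l[k] := List.getD_eq_getElem l d (by omega)
    by_cases hp : p l[k] <;>
      simp [List.countP_cons, hg, hp, List.getElem?_eq_getElem (show k < l.length by omega)]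

-- canonical value: prefix counts of empty rows / empty columns
def pvRowE (field : List (List String)) (i : Nat) : Bool :=
  !((field.getD i []).take (field.headD []).length).contains pvGALAXY

def pvColE (field : List (List String)) (j : Nat) : Bool :=
  (List.range field.length).all (fun i => (field.getD i []).getD j "" != pvGALAXY)

def pvCanon (field : List (List String)) : List (List Int) :=
  [(List.range (field.length + 1)).map (fun k => (((List.range k).countP (pvRowE field) : Nat) : Int)),
   (List.range ((field.headD []).length + 1)).map
     (fun k => (((List.range k).countP (pvColE field) : Nat) : Int))]

theorem pv_head (field : List (List String)) :
    PySem.List.pyGetD field 0 [] = field.headD [] := by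
  cases field <;> simp [PySem.List.pyGetD_zero]

theorem pv_count_lt (S : List Int) (hnd : S.Nodup) (p : Nat → Bool) (n : Nat)
    (hmem : ∀ x, x ∈ S ↔ ∃ i, i < n ∧ p i = true ∧ x = (i : Int)) (k : Nat) (hk : k ≤ n) :
    S.countP (fun x => decide (x < (k : Int))) = (List.range k).countP p := by
  have h2 : (((List.range k).filter p).map (Nat.cast : Nat → Int)).Nodup :=
    (List.nodup_range.filter p).map (fun a b h => by exact_mod_cast h)
  have hm : ∀ x, x ∈ S.filter (fun x => decide (x < (k : Int)))
      ↔ x ∈ ((List.range k).filter p).map (Nat.cast : Nat → Int) := by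
    intro x
    simp only [List.mem_filter, hmem, List.mem_map, List.mem_range, decide_eq_true_eq]
    constructor
    · rintro ⟨⟨i, hin, hp, rfl⟩, hlt⟩
      exact ⟨i, ⟨by omega, hp⟩, rfl⟩
    · rintro ⟨i, ⟨hi, hp⟩, rfl⟩
      exact ⟨⟨i, by omega, hp, rfl⟩, by exact_mod_cast hi⟩
  calc S.countP (fun x => decide (x < (k : Int)))
      = (S.filter (fun x => decide (x < (k : Int)))).length := by
        rw [List.countP_eq_length_filter]
    _ = (((List.range k).filter p).map (Nat.cast : Nat → Int)).length :=
        ((List.perm_ext_iff_of_nodup (hnd.filter _) h2).mpr hm).length_eq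
    _ = (List.range k).countP p := by
        rw [List.length_map, ← List.countP_eq_length_filter]

theorem pv_k_sub (q : Nat → Bool) (k : Nat) :
    (k : Int) - ((List.range k).countP (fun i => !q i) : Int) = ((List.range k).countP q : Int) := by
  have h := List.length_eq_countP_add_countP q (l := List.range k)
  have h2 : (List.range k).countP (fun a => decide ¬q a = true) = (List.range k).countP (fun i => !q i) :=
    List.countP_congr (fun a _ => by by_cases hq : q a <;> simp [hq])
  simp only [List.length_range, h2] at h
  omega

theorem pv_mem_rows (field : List (List String))
    (hrows : ∀ row ∈ field, (field.headD []).length ≤ row.length) (x : Int) :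
    (x ∈ (List.range field.length).flatMap (fun i =>
        (((List.range (field.headD []).length).filter (fun j =>
          (field.getD i []).getD j "" == pvGALAXY)).map (fun _ => (i : Int))))
      ↔ ∃ i, i < field.length ∧ (!pvRowE field i) = true ∧ x = (i : Int)) := by
  simp only [List.mem_flatMap, List.mem_map, List.mem_filter, List.mem_range]
  constructor
  · rintro ⟨i, hi, j, ⟨hj, hcell⟩, rfl⟩
    refine ⟨i, hi, ?_, rfl⟩
    have hlen : (field.headD []).length ≤ (field.getD i []).length := by
      rw [List.getD_eq_getElem field [] hi]; exact hrows _ (List.getElem_mem hi)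
    simp only [pvRowE, Bool.not_not]
    have hmem : pvGALAXY ∈ (field.getD i []).take (field.headD []).length := by
      rw [List.mem_take_iff_getElem]
      refine ⟨j, by omega, ?_⟩
      have hg := List.getD_eq_getElem (field.getD i []) "" (show j < (field.getD i []).length by omega)
      rw [← hg]; exact (beq_iff_eq.mp hcell).symm ▸ rfl
    simpa using hmem
  · rintro ⟨i, hi, hocc, rfl⟩
    refine ⟨i, hi, ?_⟩
    simp only [pvRowE, Bool.not_not] at hocc
    have hmem : pvGALAXY ∈ (field.getD i []).take (field.headD []).length := by simpa using hocc
    rw [List.mem_take_iff_getElem] at hmem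
    obtain ⟨j, hj, hget⟩ := hmem
    have hlen : (field.headD []).length ≤ (field.getD i []).length := by
      rw [List.getD_eq_getElem field [] hi]; exact hrows _ (List.getElem_mem hi)
    have hjm : j < (field.headD []).length := by omega
    refine ⟨j, ⟨hjm, ?_⟩, rfl⟩
    rw [List.getD_eq_getElem (field.getD i []) "" (by omega)]
    exact beq_iff_eq.mpr hget

theorem pv_mem_cols (field : List (List String)) (x : Int) :
    (x ∈ (List.range field.length).flatMap (fun i =>
        ((List.range (field.headD []).length).filter (fun j =>
          (field.getD i []).getD j "" == pvGALAXY)).map (Nat.cast : Nat → Int))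
      ↔ ∃ j, j < (field.headD []).length ∧ (!pvColE field j) = true ∧ x = (j : Int)) := by
  simp only [List.mem_flatMap, List.mem_map, List.mem_filter, List.mem_range, pvColE,
    Bool.not_eq_true', List.all_eq_false, List.mem_range, bne, Bool.not_not]
  constructor
  · rintro ⟨i, hi, j, ⟨hj, hcell⟩, rfl⟩
    exact ⟨j, hj, ⟨i, hi, by simpa [List.getD] using hcell⟩, rfl⟩
  · rintro ⟨j, hj, ⟨i, hi, hcell⟩, rfl⟩
    exact ⟨i, hi, j, ⟨hj, by simpa [List.getD] using hcell⟩, rfl⟩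

theorem pv_B_char (field : List (List String))
    (hrows : ∀ row ∈ field, (field.headD []).length ≤ row.length) :
    calc_doubled_alt field = pvCanon field := by
  simp only [calc_doubled_alt, PySem.List.len_eq, pv_head, pvCanon, pvPref]
  have hc : ∀ (a : Nat), ((a : Int) + 1) = ((a + 1 : Nat) : Int) := by
    intro a; push_cast; ring
  simp only [hc, PySem.List.pyRange_zero_nat, List.map_map,
    List.flatMap_map, List.filter_map, Function.comp_def, PySem.List.pyGetD_natCast]
  congr 1
  · refine List.map_congr_left (fun k hk => ?_)
    have hkn : k ≤ field.length := Nat.lt_succ_iff.mp (List.mem_range.mp hk)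
    rw [pv_count_lt _ (PySem.Set.nodup_ofList _) (fun i => !pvRowE field i) field.length
      (fun x => by rw [PySem.Set.mem_ofList]; exact pv_mem_rows field hrows x) k hkn]
    exact pv_k_sub (pvRowE field) k
  · congr 1
    refine List.map_congr_left (fun k hk => ?_)
    have hkm : k ≤ (field.headD []).length := Nat.lt_succ_iff.mp (List.mem_range.mp hk)
    rw [pv_count_lt _ (PySem.Set.nodup_ofList _) (fun j => !pvColE field j) (field.headD []).length
      (fun x => by rw [PySem.Set.mem_ofList]; exact pv_mem_cols field x) k hkm]
    exact pv_k_sub (pvColE field) k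

theorem pv_A_char (field : List (List String))
    (hrows : ∀ row ∈ field, (field.headD []).length ≤ row.length) :
    calc_doubled field = pvCanon field := by
  simp only [calc_doubled, PySem.List.len_eq, pv_head, pvCanon]
  have hc : ∀ (a : Nat), ((a : Int) + 1) = ((a + 1 : Nat) : Int) := by
    intro a; push_cast; ring
  simp only [PySem.List.pyRange_zero_nat, List.foldl_map, hc, PySem.List.pyRepeat_singleton,
    Int.toNat_natCast, PySem.List.pyGetD_natCast, PySem.List.pySetD_natCast]
  simp only [pv_pair_split]
  rw [pv_rowfold_eq (fun i j => (field.getD i []).getD j "" == pvGALAXY)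
    field.length (field.headD []).length field.length le_rfl]
  simp only [(pv_rowfold (fun i => (((List.range (field.headD []).length).countP
      (fun j => (field.getD i []).getD j "" == pvGALAXY) : Nat) : Int))
      field.length field.length le_rfl).2,
    (pv_colfold (fun i j => (field.getD i []).getD j "" == pvGALAXY)
      (field.headD []).length field.length).2]
  rw [pv_prefA (fun i => if (if i < field.length then
        (((List.range (field.headD []).length).countP
          (fun j => (field.getD i []).getD j "" == pvGALAXY) : Nat) : Int) else 0) > 0 then 0 else 1)
      field.length field.length le_rfl,
    pv_prefA (fun j => if (if j < (field.headD []).length then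
        (((List.range field.length).countP
          (fun i => (field.getD i []).getD j "" == pvGALAXY) : Nat) : Int) else 0) > 0 then 0 else 1)
      (field.headD []).length (field.headD []).length le_rfl]
  simp only [Nat.sub_self, List.replicate_zero, List.append_nil]
  congr 1
  · refine List.map_congr_left (fun k hk => ?_)
    have hkn : k ≤ field.length := Nat.lt_succ_iff.mp (List.mem_range.mp hk)
    refine pv_sum_ite _ _ k (fun i hi => ?_)
    have hin : i < field.length := by omega
    have hrow : (field.headD []).length ≤ (field.getD i []).length := by
      rw [List.getD_eq_getElem field [] hin]
      exact hrows _ (List.getElem_mem hin)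
    rw [if_pos hin]
    rw [pvRowE, ← pv_countP_take (field.getD i []) (fun s => s == pvGALAXY) "" _ hrow]
    by_cases hg : pvGALAXY ∈ ((field.getD i []).take (field.headD []).length)
    · have h1 : 0 < ((field.getD i []).take (field.headD []).length).countP (fun s => s == pvGALAXY) :=
        List.countP_pos_iff.mpr ⟨pvGALAXY, hg, by simp⟩
      have h2 : (0:Int) < ↑(((field.getD i []).take (field.headD []).length).countP (fun s => s == pvGALAXY)) := by
        exact_mod_cast h1
      rw [if_pos h2]
      have hcT : ((field.getD i []).take (field.headD []).length).contains pvGALAXY = true := by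
        simpa using hg
      rw [hcT]
      norm_num
    · have h1 : ((field.getD i []).take (field.headD []).length).countP (fun s => s == pvGALAXY) = 0 :=
        List.countP_eq_zero.mpr (fun a ha h => hg (by rwa [show a = pvGALAXY by simpa using h] at ha))
      rw [h1]
      have hcT : ((field.getD i []).take (field.headD []).length).contains pvGALAXY = false := by
        simpa using hg
      rw [hcT]
      norm_num
  congr 1
  refine List.map_congr_left (fun k hk => ?_)
  have hkm : k ≤ (field.headD []).length := Nat.lt_succ_iff.mp (List.mem_range.mp hk)
  refine pv_sum_ite _ _ k (fun j hj => ?_)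
  have hjm : j < (field.headD []).length := by omega
  rw [if_pos hjm, pvColE]
  by_cases ha : ∀ i < field.length, ((field.getD i []).getD j "" == pvGALAXY) = false
  · have h0 : (List.range field.length).countP
        (fun i => (field.getD i []).getD j "" == pvGALAXY) = 0 := by
      rw [List.countP_eq_zero]; intro a hmem; simpa using ha a (List.mem_range.mp hmem)
    have hall : (List.range field.length).all
        (fun i => (field.getD i []).getD j "" != pvGALAXY) = true := by
      rw [List.all_eq_true]; intro a hmem
      simp only [bne, ha a (List.mem_range.mp hmem), Bool.not_false]
    rw [h0, hall]
    norm_num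
  · push_neg at ha
    obtain ⟨i0, hi0, hcell⟩ := ha
    have hcell' : ((field.getD i0 []).getD j "" == pvGALAXY) = true := by
      simpa using hcell
    have h0 : 0 < (List.range field.length).countP
        (fun i => (field.getD i []).getD j "" == pvGALAXY) :=
      List.countP_pos_iff.mpr ⟨i0, List.mem_range.mpr hi0, hcell'⟩
    have h2 : (0:Int) < ↑((List.range field.length).countP
        (fun i => (field.getD i []).getD j "" == pvGALAXY)) := by exact_mod_cast h0
    have hall : (List.range field.length).all
        (fun i => (field.getD i []).getD j "" != pvGALAXY) = false := by
      simp only [List.all_eq_false]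
      exact ⟨i0, List.mem_range.mpr hi0, by simp [bne]; simpa using hcell'⟩
    rw [if_pos h2, hall]
    norm_num

theorem main_eq (field : List (List String)) (hpre : Pre_calc_doubled field) :
    calc_doubled field = calc_doubled_alt field := by
  exact (pv_A_char field hpre.2).trans (pv_B_char field hpre.2).symm

-- ===== VERDICT (by name: the statement is the Claim_ definition above) =====
theorem calc_doubled_spec : Claim_equal_calc_doubled := by
  intro field _ hpre
  unfold Spec_calc_doubled
  exact main_eq field hpre
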